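-- pv_equiv track=rewrite | github.com/iaramer/algorithms | python/mipt/mipt_python course/homework/hw2/first_task.py | func
-- ===== SOURCE A (Python) =====
-- def func(sols):
--     emails = set()
--     res = list()
--     for sol in reversed(sols):
--         if sol['email'].lower() not in emails:
--             emails.add(sol['email'].lower())
--             res.append(sol)
--     return res
-- ===== SOURCE B (Python) =====
-- def func(sols):
--     last = {}
--     for i, sol in enumerate(sols):
--         last[sol['email'].lower()] = i
--     res = [sol for i, sol in enumerate(sols) if last[sol['email'].lower()] == i]
--     res.reverse()
--     return res
-- ===== Notes on version B (the rewrite author's own statement) =====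
-- stated objective: alternative
-- what changed: Replaces the reversed scan with a seen-set and membership branch by two staged forward passes: one pass records the last index of each lowercased email in a dict, a second pass keeps exactly the elements sitting at their key's last index, and the kept list is reversed at the end.
import Mathlib
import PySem

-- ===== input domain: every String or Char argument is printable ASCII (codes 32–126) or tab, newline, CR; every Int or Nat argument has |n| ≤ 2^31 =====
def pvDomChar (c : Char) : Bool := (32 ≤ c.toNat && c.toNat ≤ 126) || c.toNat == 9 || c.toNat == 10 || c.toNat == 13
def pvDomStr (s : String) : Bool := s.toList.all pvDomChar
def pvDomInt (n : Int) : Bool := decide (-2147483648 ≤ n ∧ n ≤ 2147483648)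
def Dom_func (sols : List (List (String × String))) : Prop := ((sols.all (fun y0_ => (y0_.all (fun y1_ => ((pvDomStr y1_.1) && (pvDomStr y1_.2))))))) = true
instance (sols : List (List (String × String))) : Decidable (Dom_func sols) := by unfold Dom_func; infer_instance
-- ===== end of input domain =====

-- B replaces A's reversed scan with a seen-set by two staged forward passes: a dict of each
-- lowercased email's last index, then a filter keeping last occurrences, reversed at the end.

-- shared helper: the Python expression sol['email'].lower() (both sources contain it verbatim)
def emailKey (sol : List (String × String)) : String :=
  PySem.Str.lower (PySem.Dict.getD (PySem.Dict.mk sol) "email" "")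

-- ===== PORT A =====
-- loop body of A: membership test against the seen-set, append on first sight
def stepA (st : PySem.Set String × List (List (String × String)))
    (sol : List (String × String)) : PySem.Set String × List (List (String × String)) :=
  if emailKey sol ∈ st.1 then st
  else (PySem.Set.add st.1 (emailKey sol), st.2 ++ [sol])

def func (sols : List (List (String × String))) : List (List (String × String)) :=
  (sols.reverse.foldl stepA ((PySem.Set.empty : PySem.Set String), [])).2

-- ===== PORT B =====
-- first pass of B: last[sol['email'].lower()] = i over enumerate(sols)
def lastIdx (sols : List (List (String × String))) : PySem.Dict String Int :=
  (PySem.List.enumerate sols).foldl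
    (fun d p => PySem.Dict.insert d (emailKey p.2) p.1) PySem.Dict.empty

def func_alt (sols : List (List (String × String))) : List (List (String × String)) :=
  (((PySem.List.enumerate sols).filter
      (fun p => (lastIdx sols).get? (emailKey p.2) == some p.1)).map (·.2)).reverse

-- ===== PRECONDITION & SPEC =====
-- Pre_ excludes exactly the inputs where some sol lacks the key 'email' (Python A raises KeyError).
def Pre_func (sols : List (List (String × String))) : Prop :=
  ∀ sol ∈ sols, "email" ∈ sol.map Prod.fst
instance (sols : List (List (String × String))) : Decidable (Pre_func sols) := by
  unfold Pre_func; infer_instance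

def pvWitness_func : (List (List (String × String))) :=
  [[("email", "A@x.com"), ("id", "1")], [("email", "a@X.com")], [("email", "b@y.com")]]

def Spec_func (sols : List (List (String × String))) (out : List (List (String × String))) : Prop := out = func_alt sols
instance (sols : List (List (String × String))) (out : List (List (String × String))) : Decidable (Spec_func sols out) := by unfold Spec_func; infer_instance

-- ===== CLAIM =====
def Claim_equal_func : Prop := ∀ (sols : List (List (String × String))), Dom_func sols → Pre_func sols → Spec_func sols (func sols)

-- ===== LEMMAS AND PROOFS =====

-- the elements A's loop keeps when started with seen-set S, in order of traversal
def firstKeep (S : PySem.Set String) :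
    List (List (String × String)) → List (List (String × String))
  | [] => []
  | x :: t =>
    if emailKey x ∈ S then firstKeep S t
    else x :: firstKeep (PySem.Set.add S (emailKey x)) t

lemma foldA (r : List (List (String × String))) (S : PySem.Set String)
    (res : List (List (String × String))) :
    (r.foldl stepA (S, res)).2 = res ++ firstKeep S r := by
  induction r generalizing S res with
  | nil => simp [firstKeep]
  | cons x t ih =>
    by_cases h : emailKey x ∈ S
    · simp [stepA, firstKeep, h, ih]
    · simp [stepA, firstKeep, h, ih]

lemma firstKeep_congr (S S' : PySem.Set String)
    (h : ∀ a, a ∈ S ↔ a ∈ S') (r : List (List (String × String))) :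
    firstKeep S r = firstKeep S' r := by
  induction r generalizing S S' with
  | nil => rfl
  | cons x t ih =>
    by_cases hx : emailKey x ∈ S
    · simp [firstKeep, hx, (h _).mp hx, ih S S' h]
    · have hx' : emailKey x ∉ S' := fun hc => hx ((h _).mpr hc)
      simp only [firstKeep, if_neg hx, if_neg hx']
      exact congrArg _ (ih _ _ (by intro a; simp [PySem.Set.mem_add, h a]))

lemma firstKeep_not_mem (S : PySem.Set String) (r : List (List (String × String))) :
    ∀ y ∈ firstKeep S r, emailKey y ∉ S := by
  induction r generalizing S with
  | nil => simp [firstKeep]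
  | cons x t ih =>
    by_cases hx : emailKey x ∈ S
    · simpa [firstKeep, hx] using ih S
    · intro y hy
      simp only [firstKeep, if_neg hx, List.mem_cons] at hy
      rcases hy with rfl | hy
      · exact hx
      · intro hS
        exact ih _ y hy (by simp [PySem.Set.mem_add, hS])

-- filtering out a key already in S does nothing to firstKeep S r
lemma filter_firstKeep_self (S : PySem.Set String) (k : String) (hk : k ∈ S)
    (r : List (List (String × String))) :
    (firstKeep S r).filter (fun y => !(emailKey y == k)) = firstKeep S r := by
  apply List.filter_eq_self.mpr
  intro y hy
  have h2 := firstKeep_not_mem S r y hy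
  have h3 : emailKey y ≠ k := fun hc => h2 (hc ▸ hk)
  simp [h3]

lemma firstKeep_add (S : PySem.Set String) (k : String)
    (r : List (List (String × String))) :
    firstKeep (PySem.Set.add S k) r
      = (firstKeep S r).filter (fun y => !(emailKey y == k)) := by
  induction r generalizing S with
  | nil => rfl
  | cons x t ih =>
    by_cases hk : emailKey x = k
    · subst hk
      have hmem : emailKey x ∈ PySem.Set.add S (emailKey x) := by
        simp [PySem.Set.mem_add]
      by_cases hx : emailKey x ∈ S
      · rw [show firstKeep (PySem.Set.add S (emailKey x)) (x :: t)
              = firstKeep (PySem.Set.add S (emailKey x)) t from by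
            simp [firstKeep, hmem]]
        rw [firstKeep_congr (PySem.Set.add S (emailKey x)) S
              (by intro a; rw [PySem.Set.mem_add]; constructor
                  · rintro (h | rfl) <;> [exact h; exact hx]
                  · exact Or.inl) t]
        rw [show firstKeep S (x :: t) = firstKeep S t from by simp [firstKeep, hx]]
        exact (filter_firstKeep_self S (emailKey x) hx t).symm
      · rw [show firstKeep (PySem.Set.add S (emailKey x)) (x :: t)
              = firstKeep (PySem.Set.add S (emailKey x)) t from by
            simp [firstKeep, hmem]]
        rw [show firstKeep S (x :: t)
              = x :: firstKeep (PySem.Set.add S (emailKey x)) t from by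
            simp [firstKeep, hx]]
        rw [List.filter_cons_of_neg (by simp)]
        exact (filter_firstKeep_self _ (emailKey x) hmem t).symm
    · by_cases hx : emailKey x ∈ S
      · have hx' : emailKey x ∈ PySem.Set.add S k := by simp [PySem.Set.mem_add, hx]
        simp [firstKeep, hx, hx', ih]
      · have hx' : emailKey x ∉ PySem.Set.add S k := by
          simp [PySem.Set.mem_add, hx, hk]
        simp only [firstKeep, if_neg hx, if_neg hx']
        rw [List.filter_cons_of_pos (by simp [hk])]
        refine congrArg _ ?_
        rw [firstKeep_congr (PySem.Set.add (PySem.Set.add S k) (emailKey x))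
              (PySem.Set.add (PySem.Set.add S (emailKey x)) k)
              (by intro a; simp [PySem.Set.mem_add]; tauto) t]
        exact ih (PySem.Set.add S (emailKey x))

lemma funcA_eq_firstKeep (l : List (List (String × String))) :
    func l = firstKeep PySem.Set.empty l.reverse := by
  show (l.reverse.foldl stepA ((PySem.Set.empty : PySem.Set String), [])).2 = _
  rw [foldA, List.nil_append]

lemma A_snoc (l : List (List (String × String))) (x : List (String × String)) :
    func (l ++ [x]) = x :: (func l).filter (fun y => !(emailKey y == emailKey x)) := by
  rw [funcA_eq_firstKeep, funcA_eq_firstKeep]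
  have hrev : (l ++ [x]).reverse = x :: l.reverse := by simp
  rw [hrev]
  have hnm : emailKey x ∉ (PySem.Set.empty : PySem.Set String) := by
    simp [PySem.Set.empty]
  simp only [firstKeep, if_neg hnm]
  exact congrArg _ (firstKeep_add _ _ _)

-- mapping .2 past a filter that only looks at .2
lemma map_snd_filter_snd (q : List (String × String) → Bool)
    (L : List (Int × List (String × String))) :
    (L.filter (fun p => q p.2)).map (·.2) = (L.map (·.2)).filter q := by
  induction L with
  | nil => rfl
  | cons a t ih => by_cases h : q a.2 <;> simp [h, ih]

lemma B_snoc (l : List (List (String × String))) (x : List (String × String)) :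
    func_alt (l ++ [x]) = x :: (func_alt l).filter (fun y => !(emailKey y == emailKey x)) := by
  have henum : PySem.List.enumerate (l ++ [x])
      = PySem.List.enumerate l ++ [((l.length : Int), x)] := by
    simp [PySem.List.enumerate_append, PySem.List.enumerate_cons, PySem.List.enumerate_nil]
  have hlast : lastIdx (l ++ [x])
      = PySem.Dict.insert (lastIdx l) (emailKey x) (l.length : Int) := by
    simp [lastIdx, henum, List.foldl_append]
  have hcond : ∀ p ∈ PySem.List.enumerate l,
      ((lastIdx (l ++ [x])).get? (emailKey p.2) == some p.1)
        = (((lastIdx l).get? (emailKey p.2) == some p.1) && !(emailKey p.2 == emailKey x)) := by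
    intro p hp
    rcases (PySem.List.mem_enumerate_iff l 0 p).mp hp with ⟨kk, hkk, rfl⟩
    by_cases he : emailKey l[kk] = emailKey x
    · rw [hlast, he, PySem.Dict.get?_insert_self]
      simp
      omega
    · rw [hlast, PySem.Dict.get?_insert_of_ne _ _ he]
      simp [he]
  unfold func_alt
  rw [henum, List.filter_append, List.filter_congr hcond]
  have hx : ((lastIdx (l ++ [x])).get? (emailKey x) == some (l.length : Int)) = true := by
    rw [hlast, PySem.Dict.get?_insert_self]; simp
  simp only [List.filter_cons, List.filter_nil, hx]
  rw [show (List.filter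
        (fun p => ((lastIdx l).get? (emailKey p.2) == some p.1) && !(emailKey p.2 == emailKey x))
        (PySem.List.enumerate l))
      = List.filter (fun p => !(emailKey p.2 == emailKey x))
          (List.filter (fun p => (lastIdx l).get? (emailKey p.2) == some p.1)
            (PySem.List.enumerate l)) from by
    rw [List.filter_filter]
    exact List.filter_congr (fun p _ => by rw [Bool.and_comm])]
  rw [List.map_append, List.reverse_append]
  rw [map_snd_filter_snd (fun y => !(emailKey y == emailKey x))]
  rw [← List.filter_reverse]
  simp

lemma AB_eq (sols : List (List (String × String))) : func sols = func_alt sols := by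
  induction sols using List.reverseRecOn with
  | nil => rfl
  | append_singleton l x ih => rw [A_snoc, B_snoc, ih]

-- ===== VERDICT =====
theorem func_spec : Claim_equal_func := by
  intro sols _ _
  exact AB_eq sols
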